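-- pv_equiv track=rewrite | github.com/UCLALibrary/ftva-mams-data | identify_monographs.py | has_incompatible_forms
-- ===== SOURCE A (Python) =====
-- def has_incompatible_forms(combined_forms: list) -> bool:
--     """Given a list of all forms from an Alma record and a FileMaker record,
--     checks for incompatible form types."""
--     incompatible_types = {"Feature films": ["Shorts", "Short films"]}
--     for form in combined_forms:
--         if form in incompatible_types:
--             for incompatible_type in incompatible_types[form]:
--                 if incompatible_type in combined_forms:
--                     return True
--     return False
-- ===== SOURCE B (Python) =====
-- def has_incompatible_forms(combined_forms: list) -> bool:
--     """Given a list of all forms from an Alma record and a FileMaker record,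
--     checks for incompatible form types."""
--     incompatible_types = {"Feature films": ["Shorts", "Short films"]}
--     forms = set(combined_forms)
--     for form, partners in incompatible_types.items():
--         if form in forms and any(p in forms for p in partners):
--             return True
--     return False
-- ===== Notes on version B (the rewrite author's own statement) =====
-- stated objective: simpler
-- what changed: B builds a membership set of the input once and loops over the small fixed incompatible_types table, instead of A's loop over the input with a nested linear scan of the input for each partner.
import Mathlib
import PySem

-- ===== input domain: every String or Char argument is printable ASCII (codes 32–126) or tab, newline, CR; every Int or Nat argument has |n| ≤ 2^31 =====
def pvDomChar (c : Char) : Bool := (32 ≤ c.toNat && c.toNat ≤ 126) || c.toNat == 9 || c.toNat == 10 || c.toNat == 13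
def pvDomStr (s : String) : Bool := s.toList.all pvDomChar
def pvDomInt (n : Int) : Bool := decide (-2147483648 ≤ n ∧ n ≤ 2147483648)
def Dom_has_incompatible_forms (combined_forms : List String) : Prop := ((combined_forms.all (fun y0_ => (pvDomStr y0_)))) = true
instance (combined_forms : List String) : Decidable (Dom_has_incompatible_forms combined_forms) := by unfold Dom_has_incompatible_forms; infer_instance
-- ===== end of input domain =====

-- B builds a membership set once and loops over the fixed incompatible_types table instead of scanning the input with a nested scan; objective: simpler.

-- ===== PORT A =====
-- the dict literal incompatible_types
def pvIncompatTypes : PySem.Dict String (List String) :=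
  PySem.Dict.mk [("Feature films", ["Shorts", "Short films"])]

-- inner loop: 'for incompatible_type in …: if incompatible_type in combined_forms: return True'
def pvHifInner (combined_forms : List String) : List String → Bool
  | [] => false
  | t :: ts => if combined_forms.contains t then true else pvHifInner combined_forms ts

-- outer loop: 'for form in combined_forms: if form in incompatible_types: …'
def pvHifOuter (combined_forms : List String) : List String → Bool
  | [] => false
  | f :: fs =>
    if pvIncompatTypes.contains f then
      if pvHifInner combined_forms (pvIncompatTypes.getD f []) then true
      else pvHifOuter combined_forms fs
    else pvHifOuter combined_forms fs

def has_incompatible_forms (combined_forms : List String) : Bool :=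
  pvHifOuter combined_forms combined_forms

-- ===== PORT B =====
-- the incompatible_types table as .items()
def pvTableB : List (String × List String) := [("Feature films", ["Shorts", "Short films"])]

def has_incompatible_forms_alt (combined_forms : List String) : Bool :=
  let forms : PySem.Set String := PySem.Set.ofList combined_forms
  pvTableB.any (fun fp => PySem.Set.contains forms fp.1 && fp.2.any (fun p => PySem.Set.contains forms p))

-- ===== PRECONDITION & SPEC =====
def Spec_has_incompatible_forms (combined_forms : List String) (out : Bool) : Prop := out = has_incompatible_forms_alt combined_forms
instance (combined_forms : List String) (out : Bool) : Decidable (Spec_has_incompatible_forms combined_forms out) := by unfold Spec_has_incompatible_forms; infer_instance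

-- ===== CLAIM (what is proved, stated in full; the proofs are below) =====
def Claim_equal_has_incompatible_forms : Prop := ∀ (combined_forms : List String), Dom_has_incompatible_forms combined_forms → Spec_has_incompatible_forms combined_forms (has_incompatible_forms combined_forms)

-- ===== LEMMAS AND PROOFS =====

-- A's inner loop on the one partner list is the disjunction of the two membership tests
lemma pvHifInner_char (cf : List String) :
    pvHifInner cf ["Shorts", "Short films"] = (cf.contains "Shorts" || cf.contains "Short films") := by
  simp [pvHifInner]

-- A's outer loop fires iff the scanned list contains the one dict key and the inner test holds
lemma pvHifOuter_char (cf : List String) (l : List String) :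
    pvHifOuter cf l = (l.contains "Feature films" && (cf.contains "Shorts" || cf.contains "Short films")) := by
  induction l with
  | nil => simp [pvHifOuter]
  | cons f fs ih =>
    by_cases hf : f = "Feature films"
    · subst hf
      simp [pvHifOuter, pvIncompatTypes, PySem.Dict.contains_mk, PySem.Dict.getD,
            PySem.Dict.get?_mk_cons, pvHifInner_char, ih]
    · have hc : pvIncompatTypes.contains f = false := by
        simp [pvIncompatTypes, PySem.Dict.contains_mk]
        intro h
        exact hf h.symm
      have hne : decide ("Feature films" = f) = false := by
        simp; intro h; exact hf h.symm
      simp [pvHifOuter, hc, ih, hne]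

-- B reduces to the same pair of membership tests (membership in set(cf) is membership in cf)
lemma alt_char (cf : List String) :
    has_incompatible_forms_alt cf = (cf.contains "Feature films" && (cf.contains "Shorts" || cf.contains "Short films")) := by
  simp [has_incompatible_forms_alt, pvTableB, PySem.Set.contains, PySem.Set.mem_ofList]

-- ===== VERDICT (by name: the statement is the Claim_ definition above) =====
theorem has_incompatible_forms_spec : Claim_equal_has_incompatible_forms := by
  intro cf _
  unfold Spec_has_incompatible_forms has_incompatible_forms
  rw [pvHifOuter_char, alt_char]
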